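-- pv_equiv track=rewrite | github.com/fengyh3/TSMSA | bert_model/evaluate_pair.py | find_aspect
-- ===== SOURCE A (Python) =====
-- def find_aspect(pred, text):
--     aspect_start = []
--     aspect_end = []
--     flag = False
--     for idx in range(len(text)):
--         if pred[idx] == 6:
--             continue
--         if pred[idx] == 1:
--             if flag:
--                 aspect_end.append(idx)
--             aspect_start.append(idx)
--             flag = True
--         elif flag and pred[idx] != 3:
--             aspect_end.append(idx)
--             flag = False
--     if flag:
--         aspect_end.append(len(text))
--     return aspect_start, aspect_end
-- ===== SOURCE B (Python) =====
-- def find_aspect(pred, text):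
--     n = len(text)
--     aspect_start = [i for i in range(n) if pred[i] == 1]
--     aspect_end = []
--     for s in aspect_start:
--         j = s + 1
--         while j < n and pred[j] in (3, 6):
--             j += 1
--         aspect_end.append(j)
--     return aspect_start, aspect_end
-- ===== Notes on version B (the rewrite author's own statement) =====
-- stated objective: alternative
-- what changed: Replaces the single flag-driven state-machine pass with a find-all-starts comprehension followed by a per-start forward scan locating the first index after the start whose tag is outside {3,6} (or len(text)).
import Mathlib
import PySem

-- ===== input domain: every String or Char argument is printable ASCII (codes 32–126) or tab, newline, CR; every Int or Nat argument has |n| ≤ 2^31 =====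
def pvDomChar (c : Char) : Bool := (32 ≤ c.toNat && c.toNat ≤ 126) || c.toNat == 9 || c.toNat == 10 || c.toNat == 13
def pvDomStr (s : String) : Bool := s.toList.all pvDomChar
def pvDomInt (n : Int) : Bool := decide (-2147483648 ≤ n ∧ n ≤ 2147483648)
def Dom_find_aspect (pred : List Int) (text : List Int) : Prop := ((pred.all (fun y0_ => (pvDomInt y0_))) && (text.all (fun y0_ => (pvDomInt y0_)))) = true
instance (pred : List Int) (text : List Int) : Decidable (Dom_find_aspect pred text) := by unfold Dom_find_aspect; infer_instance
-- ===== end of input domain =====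

-- B replaces A's single flag-driven state-machine pass by collecting all start
-- indices first and then scanning forward from each start for its end (objective: alternative).

-- ===== PORT A =====
-- loop body of A's single pass; state = (aspect_start, aspect_end, flag)
def find_aspect_step (pred : List Int) (s : List Int × List Int × Bool) (idx : Int) :
    List Int × List Int × Bool :=
  let p := PySem.List.pyGetD pred idx 0
  if p == 6 then s
  else if p == 1 then
    (s.1 ++ [idx], (if s.2.2 then s.2.1 ++ [idx] else s.2.1), true)
  else if s.2.2 && !(p == 3) then (s.1, s.2.1 ++ [idx], false)
  else s

def find_aspect (pred : List Int) (text : List Int) : List Int × List Int :=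
  let n : Int := (text.length : Int)
  let st := (PySem.List.pyRange 0 n 1).foldl (find_aspect_step pred) ([], [], false)
  (st.1, if st.2.2 then st.2.1 ++ [n] else st.2.1)

-- ===== PORT B =====
-- the 'while j < n and pred[j] in (3, 6): j += 1' loop of Source B
def find_aspect_scan (pred : List Int) (n : Int) (j : Int) : Int :=
  if _h : j < n then
    if PySem.List.pyGetD pred j 0 == 3 || PySem.List.pyGetD pred j 0 == 6 then
      find_aspect_scan pred n (j + 1)
    else j
  else n
termination_by (n - j).toNat
decreasing_by omega

def find_aspect_alt (pred : List Int) (text : List Int) : List Int × List Int :=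
  let n : Int := (text.length : Int)
  let starts := (PySem.List.pyRange 0 n 1).filter (fun i => PySem.List.pyGetD pred i 0 == 1)
  (starts, starts.map (fun s => find_aspect_scan pred n (s + 1)))

-- ===== PRECONDITION & SPEC =====
-- Python A raises IndexError when len(text) > len(pred) (it indexes pred over range(len(text))).
def Pre_find_aspect (pred : List Int) (text : List Int) : Prop := text.length ≤ pred.length
instance (pred : List Int) (text : List Int) : Decidable (Pre_find_aspect pred text) := by unfold Pre_find_aspect; infer_instance
def pvWitness_find_aspect : List Int × List Int := ([1, 3, 2, 1, 6], [7, 7, 7, 7, 7])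

def Spec_find_aspect (pred : List Int) (text : List Int) (out : List Int × List Int) : Prop := out = find_aspect_alt pred text
instance (pred : List Int) (text : List Int) (out : List Int × List Int) : Decidable (Spec_find_aspect pred text out) := by unfold Spec_find_aspect; infer_instance

-- ===== CLAIM (what is proved, stated in full; the proofs are below) =====
def Claim_equal_find_aspect : Prop := ∀ (pred : List Int) (text : List Int), Dom_find_aspect pred text → Pre_find_aspect pred text → Spec_find_aspect pred text (find_aspect pred text)

-- ===== LEMMAS AND PROOFS =====

-- A's pass from index k onward, including the final 'if flag' flush
def find_aspect_tailA (pred : List Int) (n k : Int) (st : List Int × List Int × Bool) :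
    List Int × List Int :=
  let r := (PySem.List.pyRange k n 1).foldl (find_aspect_step pred) st
  (r.1, if r.2.2 then r.2.1 ++ [n] else r.2.1)

-- B's starts/ends restricted to indices ≥ k
def find_aspect_startsFrom (pred : List Int) (n k : Int) : List Int :=
  (PySem.List.pyRange k n 1).filter (fun i => PySem.List.pyGetD pred i 0 == 1)

def find_aspect_endsFrom (pred : List Int) (n k : Int) : List Int :=
  (find_aspect_startsFrom pred n k).map (fun s => find_aspect_scan pred n (s + 1))

theorem find_aspect_tailA_eq (pred : List Int) (n : Int) (k : Int) (hk : k ≤ n) :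
    ∀ S E flag, find_aspect_tailA pred n k (S, E, flag) =
      (S ++ find_aspect_startsFrom pred n k,
       E ++ (if flag then find_aspect_scan pred n k :: find_aspect_endsFrom pred n k
             else find_aspect_endsFrom pred n k)) := by
  by_cases h : k < n
  case neg =>
    have hkn : k = n := le_antisymm hk (not_lt.mp h)
    intro S E flag
    subst hkn
    simp [find_aspect_tailA, find_aspect_startsFrom, find_aspect_endsFrom,
      PySem.List.pyRange_one_eq_nil le_rfl]
    rw [find_aspect_scan]
    simp
    cases flag <;> simp
  case pos =>
    have hrec := find_aspect_tailA_eq pred n (k + 1) (by omega)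
    intro S E flag
    have hcons := PySem.List.pyRange_one_cons h
    rw [find_aspect_tailA, hcons]
    rw [find_aspect_startsFrom, find_aspect_endsFrom, find_aspect_startsFrom, hcons]
    rw [find_aspect_scan]
    simp only [List.foldl_cons, List.filter_cons, h, dif_pos]
    set p := PySem.List.pyGetD pred k 0 with hp
    by_cases h6 : p = 6
    · -- continue
      have step_eq : find_aspect_step pred (S, E, flag) k = (S, E, flag) := by
        simp [find_aspect_step, ← hp, h6]
      rw [step_eq]
      have ih := hrec S E flag
      simp only [find_aspect_tailA, find_aspect_startsFrom, find_aspect_endsFrom] at ih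
      rw [ih]
      simp [h6]
    · by_cases h1 : p = 1
      · -- start (and close previous span if flag)
        have step_eq : find_aspect_step pred (S, E, flag) k =
            (S ++ [k], (if flag then E ++ [k] else E), true) := by
          simp [find_aspect_step, ← hp, h1]
        rw [step_eq]
        have ih := hrec (S ++ [k]) (if flag then E ++ [k] else E) true
        simp only [find_aspect_tailA, find_aspect_startsFrom, find_aspect_endsFrom] at ih
        rw [ih]
        cases flag <;> simp [h1]
      · by_cases h3 : p = 3
        · -- inside-aspect tag 3: state unchanged
          have step_eq : find_aspect_step pred (S, E, flag) k = (S, E, flag) := by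
            simp [find_aspect_step, ← hp, h3]
          rw [step_eq]
          have ih := hrec S E flag
          simp only [find_aspect_tailA, find_aspect_startsFrom, find_aspect_endsFrom] at ih
          rw [ih]
          simp [h3]
        · -- closing tag (not in {1, 3, 6})
          have e6 : (p == 6) = false := by simp [h6]
          have e1 : (p == 1) = false := by simp [h1]
          have e3 : (!(p == 3)) = true := by simp [h3]
          have step_eq : find_aspect_step pred (S, E, flag) k =
              (if flag then (S, E ++ [k], false) else (S, E, flag)) := by
            cases flag <;> simp [find_aspect_step, ← hp, e6, e1, e3]
          rw [step_eq]
          cases flag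
          · simp only [Bool.false_eq_true, if_false]
            have ih := hrec S E false
            simp only [find_aspect_tailA, find_aspect_startsFrom, find_aspect_endsFrom] at ih
            rw [ih]
            simp [e1]
          · simp only [if_true]
            have ih := hrec S (E ++ [k]) false
            simp only [find_aspect_tailA, find_aspect_startsFrom, find_aspect_endsFrom] at ih
            rw [ih]
            simp [e1, e6, h3]
termination_by (n - k).toNat
decreasing_by omega

-- ===== VERDICT (by name: the statement is the Claim_ definition above) =====
theorem find_aspect_spec : Claim_equal_find_aspect := by
  intro pred text _ _
  unfold Spec_find_aspect find_aspect find_aspect_alt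
  have h := find_aspect_tailA_eq pred (text.length : Int) 0 (by positivity) [] [] false
  simp only [find_aspect_tailA, find_aspect_startsFrom, find_aspect_endsFrom] at h
  simp only [h, List.nil_append, if_neg (by simp : ¬ (false = true))]
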